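-- pv_equiv track=rewrite | github.com/MinTreesLearn/ML | Codeforces Submissions/1305/B/182154886.py | min_opr
-- ===== SOURCE A (Python) =====
-- def min_opr(s):
--
--     min_oprs = 0
--
--
--
--     output = []
--
--
--
--     # While I can make an operation
--
--     op = True
--
--     while op:
--
--         op = False
--
--
--
--         # Indexes to remove from the string
--
--         to_remove = set()
--
--
--
--         # Two pointers
--
--         a = 0
--
--         b = len(s) - 1
--
--
--
--         while a < b:
--
--             # Find the two parentheses
--
--             if s[a] == "(":
--
--                 while s[b] != ")" and b > 0:
--
--                     b -= 1
--
--
--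
--                 if a < b:
--
--                     # These two indexes are include in a good string
--
--                     to_remove.add(a)
--
--                     to_remove.add(b)
--
--                 b -= 1
--
--
--
--             a += 1
--
--
--
--         if len(to_remove) > 0:
--
--             op = True
--
--             output.append(
--
--                 (len(to_remove), [str(i + 1) for i in sorted(list(to_remove))])
--
--             )
--
--             s = "".join([c for i, c in enumerate(s) if i not in to_remove])
--
--             min_oprs += 1
--
--
--
--     # Print the answer
--
--     return output
-- ===== SOURCE B (Python) =====
-- def min_opr(s):
--     lefts = [i for i, c in enumerate(s) if c == "("]
--     rights = [i for i, c in enumerate(s) if c == ")"]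
--     picked_l = []
--     picked_r = []
--     for x, y in zip(lefts, reversed(rights)):
--         if x >= y:
--             break
--         picked_l.append(x)
--         picked_r.append(y)
--     if not picked_l:
--         return []
--     idx = picked_l + picked_r[::-1]
--     return [(len(idx), [str(i + 1) for i in idx])]
-- ===== Notes on version B (the rewrite author's own statement) =====
-- stated objective: simpler
-- what changed: Replaces A's repeat-until-no-change outer loop with in-place two-pointer character scans, set bookkeeping, sorting and string rebuilding by a single pass: collect the opening- and closing-bracket index lists once, pair them greedily front-of-lefts against back-of-rights until the first crossing, and emit the already-sorted picked indices directly (the greedy pass is maximal, so no second round or re-sort is needed).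
import Mathlib
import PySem

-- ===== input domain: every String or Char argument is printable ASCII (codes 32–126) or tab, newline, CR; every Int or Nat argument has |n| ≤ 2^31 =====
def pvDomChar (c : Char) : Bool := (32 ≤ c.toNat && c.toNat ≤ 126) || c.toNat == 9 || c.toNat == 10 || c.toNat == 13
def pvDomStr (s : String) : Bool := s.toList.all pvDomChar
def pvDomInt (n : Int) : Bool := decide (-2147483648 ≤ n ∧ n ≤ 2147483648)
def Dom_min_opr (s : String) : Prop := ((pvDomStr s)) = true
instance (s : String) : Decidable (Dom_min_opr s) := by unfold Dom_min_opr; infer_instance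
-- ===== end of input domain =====

-- B replaces A's repeat-until-stable passes of in-place two-pointer scans, set bookkeeping,
-- sorting and string rebuilding by one greedy pairing of the '(' index list against the
-- reversed ')' index list (the single pass is maximal), for a simpler single-pass function.


-- ===== PORT A =====
-- s[i] for an index A keeps in range (exact there; '?' is never produced)
def chA (l : List Char) (i : Int) : Char := (PySem.List.pyGet? l i).getD '?'

-- inner `while s[b] != ")" and b > 0: b -= 1` (fuel is only a termination guard:
-- b decreases by 1 per step and the loop stops at b ≤ 0, so b.toNat + 1 steps always suffice)
def scanA (l : List Char) (fuel : Nat) (b : Int) : Int :=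
  match fuel with
  | 0 => b
  | f + 1 => if chA l b ≠ ')' ∧ b > 0 then scanA l f (b - 1) else b

-- inner `while a < b:` loop, carrying the to_remove set (fuel is only a termination
-- guard: a rises and b never rises, so b - a bounds the remaining iterations)
def loopA (l : List Char) (fuel : Nat) (a b : Int) (tr : PySem.Set Int) : PySem.Set Int :=
  match fuel with
  | 0 => tr
  | f + 1 =>
    if a < b then
      if chA l a = '(' then
        let b1 := scanA l (b.toNat + 1) b
        let tr' := if a < b1 then (tr.add a).add b1 else tr
        loopA l f (a + 1) (b1 - 1) tr'
      else loopA l f (a + 1) b tr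
    else tr

-- one pass: the to_remove set of one outer-loop iteration
def passA (l : List Char) : PySem.Set Int :=
  loopA l (l.length + 1) 0 ((l.length : Int) - 1) PySem.Set.empty

-- `"".join([c for i, c in enumerate(s) if i not in to_remove])`
def removeA (l : List Char) (tr : PySem.Set Int) : List Char :=
  ((PySem.List.enumerate l).filter (fun p => ¬ tr.contains p.1)).map (fun p => p.2)

-- outer `while op:` loop: each iteration with a nonempty to_remove appends one tuple and
-- shrinks s, so s's length bounds the number of iterations (fuel is only that guard)
def outerA (l : List Char) (fuel : Nat) (output : List (Int × List String)) :
    List (Int × List String) :=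
  match fuel with
  | 0 => output
  | f + 1 =>
    let tr := passA l
    if 0 < tr.len then
      outerA (removeA l tr) f
        (output ++ [(tr.len, (PySem.List.sorted (tr : List Int) (fun i => i)).map
          (fun i => PySem.Int.toStr (i + 1)))])
    else output

def min_opr (s : String) : List (Int × List String) := outerA s.toList (s.toList.length + 1) []

-- ===== PORT B =====
-- `lefts = [i for i, c in enumerate(s) if c == "("]` (and the same for ')')
def idxOf (l : List Char) (c : Char) : List Int :=
  ((PySem.List.enumerate l).filter (fun p => p.2 == c)).map (fun p => p.1)

-- the `for x, y in zip(lefts, reversed(rights))` loop with its break, building both picked lists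
def pickB : List (Int × Int) → List Int × List Int
  | [] => ([], [])
  | (x, y) :: rest =>
    if y ≤ x then ([], [])
    else
      let p := pickB rest
      (x :: p.1, y :: p.2)

def min_opr_alt (s : String) : List (Int × List String) :=
  let l := s.toList
  let lefts := idxOf l '('
  let rights := idxOf l ')'
  let p := pickB (lefts.zip rights.reverse)
  if p.1 = [] then []
  else
    let idx := p.1 ++ p.2.reverse
    [((idx.length : Int), idx.map (fun i => PySem.Int.toStr (i + 1)))]

-- ===== PRECONDITION & SPEC =====
def Spec_min_opr (s : String) (out : List (Int × List String)) : Prop := out = min_opr_alt s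
instance (s : String) (out : List (Int × List String)) : Decidable (Spec_min_opr s out) := by unfold Spec_min_opr; infer_instance

-- ===== CLAIM (what is proved, stated in full; the proofs are below) =====
def Claim_equal_min_opr : Prop := ∀ (s : String), Dom_min_opr s → Spec_min_opr s (min_opr s)

-- ===== LEMMAS AND PROOFS =====

-- ---- basic facts about chA and idxOf ----

theorem chA_eq (l : List Char) (k : Nat) (h : k < l.length) : chA l (k : Int) = l[k] := by
  simp [chA, PySem.List.pyGet?_natCast, List.getElem?_eq_getElem h]

theorem mem_idxOf (l : List Char) (c : Char) (x : Int) :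
    x ∈ idxOf l c ↔ ∃ (k : Nat) (h : k < l.length), x = (k : Int) ∧ l[k] = c := by
  unfold idxOf
  simp only [List.mem_map, List.mem_filter, PySem.List.mem_enumerate_iff]
  constructor
  · rintro ⟨p, ⟨⟨k, hk, rfl⟩, hc⟩, rfl⟩
    simp only [beq_iff_eq] at hc
    exact ⟨k, hk, by simpa using hc⟩
  · rintro ⟨k, hk, rfl, hc⟩
    exact ⟨((k : Int), l[k]), ⟨⟨k, hk, by simp⟩, by simpa using hc⟩, rfl⟩

theorem idxOf_pairwise (l : List Char) (c : Char) : (idxOf l c).Pairwise (· < ·) := by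
  unfold idxOf
  exact List.Pairwise.map _ (fun _ _ h => h)
    (List.Pairwise.sublist List.filter_sublist (PySem.List.pairwise_lt_enumerate l 0))

theorem idxOf_bounds (l : List Char) (c : Char) (x : Int) (hx : x ∈ idxOf l c) :
    0 ≤ x ∧ x ≤ (l.length : Int) - 1 := by
  rcases (mem_idxOf l c x).1 hx with ⟨k, hk, rfl, _⟩
  omega

theorem mem_idxOf_of_chA (l : List Char) (c : Char) (a : Int)
    (h0 : 0 ≤ a) (hlen : a < (l.length : Int)) (hc : chA l a = c) : a ∈ idxOf l c := by
  rcases Int.eq_ofNat_of_zero_le h0 with ⟨k, rfl⟩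
  have hk : k < l.length := by exact_mod_cast hlen
  exact (mem_idxOf l c _).2 ⟨k, hk, rfl, by rw [← chA_eq l k hk]; exact hc⟩

theorem not_mem_idxOf_of_chA (l : List Char) (c : Char) (a : Int)
    (h0 : 0 ≤ a) (hlen : a < (l.length : Int)) (hc : chA l a ≠ c) : a ∉ idxOf l c := by
  intro hmem
  rcases (mem_idxOf l c a).1 hmem with ⟨k, hk, rfl, hck⟩
  exact hc (by rw [chA_eq l k hk]; exact hck)

theorem idxOf_disjoint (l : List Char) (x : Int)
    (h1 : x ∈ idxOf l '(') (h2 : x ∈ idxOf l ')') : False := by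
  rcases (mem_idxOf l '(' x).1 h1 with ⟨k1, hk1, he1, hc1⟩
  rcases (mem_idxOf l ')' x).1 h2 with ⟨k2, hk2, he2, hc2⟩
  have : k1 = k2 := by omega
  subst this
  rw [hc1] at hc2
  exact absurd hc2 (by decide)

-- ---- filter lemmas on strictly increasing Int lists ----

def remGe (xs : List Int) (a : Int) : List Int := xs.filter (fun x => decide (a ≤ x))
def remLe (xs : List Int) (b : Int) : List Int := xs.filter (fun x => decide (x ≤ b))

theorem remGe_of_mem (xs : List Int) (a : Int) (hs : xs.Pairwise (· < ·)) (ha : a ∈ xs) :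
    remGe xs a = a :: remGe xs (a + 1) := by
  induction xs with
  | nil => cases ha
  | cons x t ih =>
    rcases List.pairwise_cons.1 hs with ⟨hx, ht⟩
    rcases List.mem_cons.1 ha with rfl | hat
    · have h1 : remGe (a :: t) a = a :: t.filter (fun x => decide (a ≤ x)) := by
        simp [remGe]
      have h2 : t.filter (fun x => decide (a ≤ x)) = t := by
        rw [List.filter_eq_self]; intro u hu; have := hx u hu; simp; omega
      have h3 : remGe (a :: t) (a + 1) = t.filter (fun x => decide (a + 1 ≤ x)) := by
        simp [remGe]
      have h4 : t.filter (fun x => decide (a + 1 ≤ x)) = t := by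
        rw [List.filter_eq_self]; intro u hu; have := hx u hu; simp; omega
      rw [h1, h2, h3, h4]
    · have hxa : x < a := hx a hat
      have hf1 : (decide (a ≤ x)) = false := decide_eq_false (by omega)
      have hf2 : (decide (a + 1 ≤ x)) = false := decide_eq_false (by omega)
      have h1 : remGe (x :: t) a = remGe t a := by
        simp only [remGe, List.filter_cons, hf1]; simp
      have h2 : remGe (x :: t) (a + 1) = remGe t (a + 1) := by
        simp only [remGe, List.filter_cons, hf2]; simp
      rw [h1, h2, ih ht hat]

theorem remGe_of_not_mem (xs : List Int) (a : Int) (ha : a ∉ xs) :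
    remGe xs a = remGe xs (a + 1) := by
  apply List.filter_congr
  intro x hx
  have : x ≠ a := fun h => ha (h ▸ hx)
  simp; omega

theorem remLe_of_mem (xs : List Int) (b : Int) (hs : xs.Pairwise (· < ·)) (hb : b ∈ xs) :
    remLe xs b = remLe xs (b - 1) ++ [b] := by
  induction xs with
  | nil => cases hb
  | cons x t ih =>
    rcases List.pairwise_cons.1 hs with ⟨hx, ht⟩
    rcases List.mem_cons.1 hb with rfl | hbt
    · have h2 : t.filter (fun x => decide (x ≤ b)) = [] := by
        rw [List.filter_eq_nil_iff]; intro u hu; have := hx u hu; simp; omega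
      have h4 : t.filter (fun x => decide (x ≤ b - 1)) = [] := by
        rw [List.filter_eq_nil_iff]; intro u hu; have := hx u hu; simp; omega
      have hT : (decide (b ≤ b)) = true := by simp
      have hF : (decide (b ≤ b - 1)) = false := decide_eq_false (by omega)
      simp only [remLe, List.filter_cons, hT, hF, if_true, h2, h4]
      simp
    · have hxb : x < b := hx b hbt
      have hT1 : (decide (x ≤ b)) = true := decide_eq_true (by omega)
      have hT2 : (decide (x ≤ b - 1)) = true := decide_eq_true (by omega)
      have h1 : remLe (x :: t) b = x :: remLe t b := by
        simp only [remLe, List.filter_cons, hT1]; simp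
      have h2 : remLe (x :: t) (b - 1) = x :: remLe t (b - 1) := by
        simp only [remLe, List.filter_cons, hT2]; simp
      rw [h1, h2, ih ht hbt, List.cons_append]

theorem remLe_of_not_mem (xs : List Int) (b : Int) (hb : b ∉ xs) :
    remLe xs b = remLe xs (b - 1) := by
  apply List.filter_congr
  intro x hx
  have : x ≠ b := fun h => hb (h ▸ hx)
  simp; omega

-- ---- the greedy pairing, flattened in A's insertion order ----

def pickFlat : List Int → List Int → List Int
  | x :: ls, y :: rs => if x < y then x :: y :: pickFlat ls rs else []
  | _, _ => []

theorem pickB_cons (x y : Int) (rest : List (Int × Int)) :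
    pickB ((x, y) :: rest) =
      if y ≤ x then ([], []) else (x :: (pickB rest).1, y :: (pickB rest).2) := rfl

theorem pickFlat_cons (x y : Int) (ls rs : List Int) :
    pickFlat (x :: ls) (y :: rs) = if x < y then x :: y :: pickFlat ls rs else [] := rfl

theorem pickFlat_nil (L R : List Int) (h : ∀ x ∈ L, ∀ y ∈ R, ¬ x < y) :
    pickFlat L R = [] := by
  cases L with
  | nil => rfl
  | cons x ls =>
    cases R with
    | nil => rfl
    | cons y rs =>
      unfold pickFlat
      rw [if_neg (h x (by simp) y (by simp))]

theorem pickFlat_nil_iff (L R : List Int) :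
    pickFlat L R = [] ↔ (pickB (L.zip R)).1 = [] := by
  cases L with
  | nil => simp [pickFlat, pickB]
  | cons x ls =>
    cases R with
    | nil => simp [pickFlat, pickB]
    | cons y rs =>
      rw [pickFlat_cons, List.zip_cons_cons, pickB_cons]
      by_cases h : x < y
      · rw [if_pos h, if_neg (by omega)]
        simp
      · rw [if_neg h, if_pos (by omega)]

theorem pick_main (L R : List Int) (hL : L.Pairwise (· < ·)) (hR : R.Pairwise (· > ·)) :
    (pickFlat L R).Perm ((pickB (L.zip R)).1 ++ (pickB (L.zip R)).2.reverse) ∧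
    ((pickB (L.zip R)).1 ++ (pickB (L.zip R)).2.reverse).Pairwise (· < ·) ∧
    (∀ w, (∀ u ∈ L, w < u) → ∀ z ∈ pickFlat L R, w < z) ∧
    (∀ w, (∀ u ∈ R, u < w) → ∀ z ∈ pickFlat L R, z < w) := by
  induction L generalizing R with
  | nil => simp [pickFlat, pickB]
  | cons x ls ih =>
    cases R with
    | nil => simp [pickFlat, pickB]
    | cons y rs =>
      rcases List.pairwise_cons.1 hL with ⟨hx, hls⟩
      rcases List.pairwise_cons.1 hR with ⟨hy, hrs⟩
      by_cases hxy : x < y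
      · rcases ih rs hls hrs with ⟨ihP, ihS, ihLo, ihHi⟩
        have hpick : pickB ((x :: ls).zip (y :: rs)) =
            (x :: (pickB (ls.zip rs)).1, y :: (pickB (ls.zip rs)).2) := by
          rw [List.zip_cons_cons, pickB_cons, if_neg (by omega)]
        have hflat : pickFlat (x :: ls) (y :: rs) = x :: y :: pickFlat ls rs := by
          rw [pickFlat_cons, if_pos hxy]
        set pl := (pickB (ls.zip rs)).1
        set pr := (pickB (ls.zip rs)).2
        have hmemM : ∀ z ∈ pl ++ pr.reverse, z ∈ pickFlat ls rs := fun z hz => ihP.mem_iff.2 hz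
        refine ⟨?_, ?_, ?_, ?_⟩
        · rw [hpick, hflat]
          have h1 : (x :: y :: pickFlat ls rs).Perm (x :: y :: (pl ++ pr.reverse)) :=
            (ihP.cons y).cons x
          have h2 : (x :: y :: (pl ++ pr.reverse)).Perm (x :: (pl ++ pr.reverse ++ [y])) :=
            ((List.perm_append_singleton y (pl ++ pr.reverse)).symm.cons x)
          have h3 : x :: (pl ++ pr.reverse ++ [y]) = (x :: pl) ++ (y :: pr).reverse := by simp
          exact h3 ▸ (h1.trans h2)
        · rw [hpick]
          simp only [List.reverse_cons]
          have hMy : ∀ z ∈ pl ++ pr.reverse, z < y :=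
            fun z hz => ihHi y (fun u hu => hy u hu) z (hmemM z hz)
          have hxM : ∀ z ∈ pl ++ pr.reverse, x < z :=
            fun z hz => ihLo x (fun u hu => hx u hu) z (hmemM z hz)
          have hMid : (pl ++ pr.reverse ++ [y]).Pairwise (· < ·) := by
            apply List.pairwise_append.2
            refine ⟨ihS, List.pairwise_singleton _ _, ?_⟩
            intro z hz y' hy'
            rcases List.mem_singleton.1 hy' with rfl
            exact hMy z hz
          have : (x :: (pl ++ pr.reverse ++ [y])).Pairwise (· < ·) := by
            apply List.pairwise_cons.2
            refine ⟨?_, hMid⟩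
            intro z hz
            rcases List.mem_append.1 hz with h | h
            · exact hxM z h
            · rcases List.mem_singleton.1 h with rfl; exact hxy
          simpa [List.append_assoc] using this
        · intro w hw z hz
          rw [hflat] at hz
          rcases List.mem_cons.1 hz with rfl | hz
          · exact hw z (by simp)
          rcases List.mem_cons.1 hz with rfl | hz
          · exact lt_trans (hw x (by simp)) hxy
          · exact ihLo w (fun u hu => hw u (by simp [hu])) z hz
        · intro w hw z hz
          rw [hflat] at hz
          rcases List.mem_cons.1 hz with rfl | hz
          · exact lt_trans hxy (hw y (by simp))
          rcases List.mem_cons.1 hz with rfl | hz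
          · exact hw z (by simp)
          · exact ihHi w (fun u hu => hw u (by simp [hu])) z hz
      · have hpick : pickB ((x :: ls).zip (y :: rs)) = ([], []) := by
          rw [List.zip_cons_cons, pickB_cons, if_pos (by omega)]
        have hflat : pickFlat (x :: ls) (y :: rs) = [] := by
          rw [pickFlat_cons, if_neg hxy]
        rw [hpick, hflat]
        simp

-- leftover indices: an unpicked '(' lies to the right of every unpicked ')'
theorem pick_leftover (L R : List Int) (hL : L.Pairwise (· < ·)) (hR : R.Pairwise (· > ·))
    (hne : ∀ x ∈ L, ∀ y ∈ R, x ≠ y) :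
    ∀ x ∈ L, x ∉ (pickB (L.zip R)).1 → ∀ y ∈ R, y ∉ (pickB (L.zip R)).2 → y < x := by
  induction L generalizing R with
  | nil => simp
  | cons x0 ls ih =>
    cases R with
    | nil => simp
    | cons y0 rs =>
      rcases List.pairwise_cons.1 hL with ⟨hx0, hls⟩
      rcases List.pairwise_cons.1 hR with ⟨hy0, hrs⟩
      by_cases hxy : y0 ≤ x0
      · have hpick : pickB ((x0 :: ls).zip (y0 :: rs)) = ([], []) := by
          rw [List.zip_cons_cons, pickB_cons, if_pos hxy]
        rw [hpick]
        intro x hx _ y hy _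
        have hy0x0 : y0 < x0 := lt_of_le_of_ne hxy (fun h => hne x0 (by simp) y0 (by simp) h.symm)
        have hxge : x0 ≤ x := by
          rcases List.mem_cons.1 hx with rfl | h
          · exact le_refl x
          · exact le_of_lt (hx0 x h)
        have hyle : y ≤ y0 := by
          rcases List.mem_cons.1 hy with rfl | h
          · exact le_refl y
          · exact le_of_lt (hy0 y h)
        omega
      · have hpick : pickB ((x0 :: ls).zip (y0 :: rs)) =
            (x0 :: (pickB (ls.zip rs)).1, y0 :: (pickB (ls.zip rs)).2) := by
          rw [List.zip_cons_cons, pickB_cons, if_neg hxy]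
        rw [hpick]
        intro x hx hxn y hy hyn
        simp only [List.mem_cons, not_or] at hxn hyn
        have hx' : x ∈ ls := by
          rcases List.mem_cons.1 hx with rfl | h
          · exact absurd rfl hxn.1
          · exact h
        have hy' : y ∈ rs := by
          rcases List.mem_cons.1 hy with rfl | h
          · exact absurd rfl hyn.1
          · exact h
        exact ih rs hls hrs (fun u hu v hv => hne u (by simp [hu]) v (by simp [hv]))
          x hx' hxn.2 y hy' hyn.2

-- ---- characterizing A's pointer scans ----

theorem remLe_neg (l : List Char) (c : Char) (b : Int) (hb : b < 0) :
    remLe (idxOf l c) b = [] := by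
  rw [remLe, List.filter_eq_nil_iff]
  intro x hx
  have := idxOf_bounds l c x hx
  simp; omega

theorem remGe_all (l : List Char) (c : Char) : remGe (idxOf l c) 0 = idxOf l c := by
  rw [remGe, List.filter_eq_self]
  intro x hx
  have := idxOf_bounds l c x hx
  simp; omega

theorem remLe_all (l : List Char) (c : Char) :
    remLe (idxOf l c) ((l.length : Int) - 1) = idxOf l c := by
  rw [remLe, List.filter_eq_self]
  intro x hx
  have := idxOf_bounds l c x hx
  simp; omega

theorem scanA_succ (l : List Char) (f : Nat) (b : Int) :
    scanA l (f + 1) b = if chA l b ≠ ')' ∧ b > 0 then scanA l f (b - 1) else b := rfl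

theorem loopA_succ (l : List Char) (f : Nat) (a b : Int) (tr : PySem.Set Int) :
    loopA l (f + 1) a b tr =
      if a < b then
        if chA l a = '(' then
          loopA l f (a + 1) (scanA l (b.toNat + 1) b - 1)
            (if a < scanA l (b.toNat + 1) b then (tr.add a).add (scanA l (b.toNat + 1) b) else tr)
        else loopA l f (a + 1) b tr
      else tr := rfl

theorem outerA_succ (l : List Char) (f : Nat) (out : List (Int × List String)) :
    outerA l (f + 1) out =
      if 0 < (passA l).len then
        outerA (removeA l (passA l)) f
          (out ++ [((passA l).len, (PySem.List.sorted ((passA l) : List Int) (fun i => i)).map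
            (fun i => PySem.Int.toStr (i + 1)))])
      else out := rfl

theorem scanA_spec (l : List Char) (fuel : Nat) :
    ∀ b : Int, b.toNat < fuel → 0 ≤ b → b ≤ (l.length : Int) - 1 →
    (remLe (idxOf l ')') b = [] ∧ scanA l fuel b = 0) ∨
    (∃ rs y, remLe (idxOf l ')') b = rs ++ [y] ∧ scanA l fuel b = y ∧
      remLe (idxOf l ')') (y - 1) = rs ∧ 0 ≤ y ∧ y ≤ b) := by
  induction fuel with
  | zero => intro b hf; omega
  | succ f ih =>
    intro b hf h0 hb
    by_cases hc : chA l b = ')'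
    · have hmem : b ∈ idxOf l ')' := mem_idxOf_of_chA l ')' b h0 (by omega) hc
      have hs : scanA l (f + 1) b = b := by
        rw [scanA_succ, if_neg (by simp [hc])]
      right
      exact ⟨remLe (idxOf l ')') (b - 1), b,
        remLe_of_mem _ b (idxOf_pairwise l ')') hmem, hs, rfl, h0, le_refl b⟩
    · have hnm : b ∉ idxOf l ')' := not_mem_idxOf_of_chA l ')' b h0 (by omega) hc
      have hstep : remLe (idxOf l ')') b = remLe (idxOf l ')') (b - 1) :=
        remLe_of_not_mem _ b hnm
      by_cases hbp : b > 0
      · have hs : scanA l (f + 1) b = scanA l f (b - 1) := by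
          rw [scanA_succ, if_pos ⟨hc, hbp⟩]
        rcases ih (b - 1) (by omega) (by omega) (by omega) with ⟨h1, h2⟩ | ⟨rs, y, h1, h2, h3, h4, h5⟩
        · left; exact ⟨hstep.trans h1, hs.trans h2⟩
        · right; exact ⟨rs, y, hstep.trans h1, hs.trans h2, h3, h4, by omega⟩
      · have hb0 : b = 0 := by omega
        have hs : scanA l (f + 1) b = b := by
          rw [scanA_succ, if_neg (by tauto)]
        left
        refine ⟨?_, by omega⟩
        rw [hstep, hb0]
        exact remLe_neg l ')' (-1) (by omega)

theorem loopA_inv (l : List Char) (fuel : Nat) :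
    ∀ (a b : Int) (tr : PySem.Set Int), (b - a).toNat < fuel → 0 ≤ a →
      b ≤ (l.length : Int) - 1 →
    loopA l fuel a b tr =
      (pickFlat (remGe (idxOf l '(') a) ((remLe (idxOf l ')') b).reverse)).foldl
        PySem.Set.add tr := by
  induction fuel with
  | zero => intro a b tr hf; omega
  | succ f ih =>
    intro a b tr hf h0 hb
    by_cases hab : a < b
    · by_cases hc : chA l a = '('
      · have hmemL : a ∈ idxOf l '(' := mem_idxOf_of_chA l '(' a h0 (by omega) hc
        have hLstep : remGe (idxOf l '(') a = a :: remGe (idxOf l '(') (a + 1) :=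
          remGe_of_mem _ _ (idxOf_pairwise _ _) hmemL
        rcases scanA_spec l (b.toNat + 1) b (by omega) (by omega) hb with
          ⟨hR0, hs0⟩ | ⟨rs, y, hReq, hseq, hRs, hy0, hyb⟩
        · -- no ')' at or below b: scan hits 0, nothing is added, loop dies out
          have hrec := ih (a + 1) (0 - 1) tr (by omega) (by omega) (by omega)
          have hstep : loopA l (f + 1) a b tr = loopA l f (a + 1) (0 - 1) tr := by
            rw [loopA_succ, if_pos hab, if_pos hc]
            simp only [hs0]
            rw [if_neg (by omega)]
          rw [hstep, hrec, hR0]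
          rw [remLe_neg l ')' (0 - 1) (by omega)]
          simp [pickFlat, hLstep]
        · by_cases hay : a < y
          · have hrec := ih (a + 1) (y - 1) ((tr.add a).add y) (by omega) (by omega) (by omega)
            have hstep : loopA l (f + 1) a b tr =
                loopA l f (a + 1) (y - 1) ((tr.add a).add y) := by
              rw [loopA_succ, if_pos hab, if_pos hc]
              simp only [hseq]
              rw [if_pos hay]
            rw [hstep, hrec, hLstep, hReq, hRs]
            rw [List.reverse_append, List.reverse_singleton, List.singleton_append]
            rw [pickFlat_cons, if_pos hay]
            rfl
          · have hrec := ih (a + 1) (y - 1) tr (by omega) (by omega) (by omega)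
            have hstep : loopA l (f + 1) a b tr = loopA l f (a + 1) (y - 1) tr := by
              rw [loopA_succ, if_pos hab, if_pos hc]
              simp only [hseq]
              rw [if_neg hay]
            have hnil : pickFlat (remGe (idxOf l '(') (a + 1))
                ((remLe (idxOf l ')') (y - 1)).reverse) = [] := by
              apply pickFlat_nil
              intro x hx y' hy'
              have hxa : a + 1 ≤ x := by
                have := List.of_mem_filter hx; simpa using this
              have hy'm : y' ∈ remLe (idxOf l ')') (y - 1) := List.mem_reverse.1 hy'
              have hy'b : y' ≤ y - 1 := by
                have := List.of_mem_filter hy'm; simpa using this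
              omega
            rw [hstep, hrec, hnil, hLstep, hReq]
            rw [List.reverse_append, List.reverse_singleton, List.singleton_append]
            rw [pickFlat_cons, if_neg hay]
      · have hnmL : a ∉ idxOf l '(' := not_mem_idxOf_of_chA l '(' a h0 (by omega) hc
        have hrec := ih (a + 1) b tr (by omega) (by omega) hb
        have hstep : loopA l (f + 1) a b tr = loopA l f (a + 1) b tr := by
          rw [loopA_succ, if_pos hab, if_neg hc]
        rw [hstep, hrec, remGe_of_not_mem _ a hnmL]
    · have hstep : loopA l (f + 1) a b tr = tr := by
        rw [loopA_succ, if_neg hab]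
      have hnil : pickFlat (remGe (idxOf l '(') a) ((remLe (idxOf l ')') b).reverse) = [] := by
        apply pickFlat_nil
        intro x hx y hy
        have hxa : a ≤ x := by
          have := List.of_mem_filter hx; simpa using this
        have hym : y ∈ remLe (idxOf l ')') b := List.mem_reverse.1 hy
        have hyb : y ≤ b := by
          have := List.of_mem_filter hym; simpa using this
        omega
      rw [hstep, hnil]
      rfl

theorem passA_eq (l : List Char) :
    passA l = PySem.Set.ofList (pickFlat (idxOf l '(') ((idxOf l ')').reverse)) := by
  unfold passA
  rw [loopA_inv l (l.length + 1) 0 ((l.length : Int) - 1) PySem.Set.empty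
    (by omega) (by omega) (by omega)]
  rw [remGe_all, remLe_all]
  rfl

-- ---- after one pass, every surviving '(' lies right of every surviving ')' ----

theorem removeA_no_cross (l : List Char) (S : PySem.Set Int)
    (hcross : ∀ i j : Int, i ∈ idxOf l '(' → i ∉ S → j ∈ idxOf l ')' → j ∉ S → j < i) :
    ∀ x ∈ idxOf (removeA l S) '(', ∀ y ∈ idxOf (removeA l S) ')', ¬ x < y := by
  intro x hx y hy hlt
  rcases (mem_idxOf _ '(' x).1 hx with ⟨k1, hk1, rfl, hc1⟩
  rcases (mem_idxOf _ ')' y).1 hy with ⟨k2, hk2, rfl, hc2⟩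
  have hk12 : k1 < k2 := by exact_mod_cast hlt
  unfold removeA at hk1 hk2 hc1 hc2
  rw [List.length_map] at hk1 hk2
  rw [List.getElem_map] at hc1 hc2
  set K := (PySem.List.enumerate l).filter (fun p => decide ¬(S.contains p.1 = true)) with hK
  have hmem1 : K[k1] ∈ K := List.getElem_mem hk1
  have hmem2 : K[k2] ∈ K := List.getElem_mem hk2
  have hsplit : ∀ p ∈ K, (∃ (j : Nat) (h : j < l.length), p = ((j : Int), l[j])) ∧ p.1 ∉ S := by
    intro p hp
    rcases List.mem_filter.1 hp with ⟨hpe, hpc⟩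
    rcases (PySem.List.mem_enumerate_iff l 0 p).1 hpe with ⟨j, hj, hpj⟩
    refine ⟨⟨j, hj, by simpa using hpj⟩, ?_⟩
    simp only [decide_eq_true_eq] at hpc
    exact fun hmem => hpc ((PySem.Set.contains_iff S p.1).2 hmem)
  rcases hsplit _ hmem1 with ⟨⟨j1, hj1, hpj1⟩, hns1⟩
  rcases hsplit _ hmem2 with ⟨⟨j2, hj2, hpj2⟩, hns2⟩
  have hPW : K.Pairwise (fun p q => p.1 < q.1) :=
    List.Pairwise.sublist List.filter_sublist (PySem.List.pairwise_lt_enumerate l 0)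
  have hij : K[k1].1 < K[k2].1 := List.pairwise_iff_getElem.1 hPW k1 k2 hk1 hk2 hk12
  rw [hpj1, hpj2] at hij
  have hiL : (j1 : Int) ∈ idxOf l '(' := by
    refine (mem_idxOf l '(' _).2 ⟨j1, hj1, rfl, ?_⟩
    have : K[k1].2 = l[j1] := by rw [hpj1]
    rw [← this, hc1]
  have hjR : (j2 : Int) ∈ idxOf l ')' := by
    refine (mem_idxOf l ')' _).2 ⟨j2, hj2, rfl, ?_⟩
    have : K[k2].2 = l[j2] := by rw [hpj2]
    rw [← this, hc2]
  have hns1' : (j1 : Int) ∉ S := by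
    have : K[k1].1 = (j1 : Int) := by rw [hpj1]
    rw [← this]; exact hns1
  have hns2' : (j2 : Int) ∉ S := by
    have : K[k2].1 = (j2 : Int) := by rw [hpj2]
    rw [← this]; exact hns2
  have := hcross (j1 : Int) (j2 : Int) hiL hns1' hjR hns2'
  simp only [Int.ofNat_lt] at hij
  omega

theorem cross_after_pass (l : List Char) :
    ∀ i j : Int, i ∈ idxOf l '(' → i ∉ passA l → j ∈ idxOf l ')' → j ∉ passA l → j < i := by
  intro i j hiL hiS hjR hjS
  have hRrev : ((idxOf l ')').reverse).Pairwise (· > ·) := by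
    rw [List.pairwise_reverse]; exact idxOf_pairwise l ')'
  have hPerm := (pick_main (idxOf l '(') ((idxOf l ')').reverse) (idxOf_pairwise l '(') hRrev).1
  have hmemS : ∀ z : Int, z ∈ passA l ↔
      z ∈ (pickB ((idxOf l '(').zip ((idxOf l ')').reverse))).1 ∨
      z ∈ (pickB ((idxOf l '(').zip ((idxOf l ')').reverse))).2 := by
    intro z
    rw [passA_eq, PySem.Set.mem_ofList, hPerm.mem_iff]
    simp [List.mem_append, List.mem_reverse]
  have hne : ∀ x ∈ idxOf l '(', ∀ y ∈ (idxOf l ')').reverse, x ≠ y := by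
    intro x hx y hy h
    exact idxOf_disjoint l x hx (List.mem_reverse.1 (h ▸ hy))
  have hpl : i ∉ (pickB ((idxOf l '(').zip ((idxOf l ')').reverse))).1 :=
    fun h => hiS ((hmemS i).2 (Or.inl h))
  have hpr : j ∉ (pickB ((idxOf l '(').zip ((idxOf l ')').reverse))).2 :=
    fun h => hjS ((hmemS j).2 (Or.inr h))
  exact pick_leftover (idxOf l '(') ((idxOf l ')').reverse) (idxOf_pairwise l '(') hRrev hne
    i hiL hpl j (List.mem_reverse.2 hjR) hpr

theorem pass_remove_nil (l : List Char) :
    pickFlat (idxOf (removeA l (passA l)) '(')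
      ((idxOf (removeA l (passA l)) ')').reverse) = [] := by
  apply pickFlat_nil
  intro x hx y hy
  exact removeA_no_cross l (passA l) (cross_after_pass l) x hx y (List.mem_reverse.1 hy)

-- ===== VERDICT (by name: the statement is the Claim_ definition above) =====
theorem min_opr_spec : Claim_equal_min_opr := by
  intro s _
  unfold Spec_min_opr
  show min_opr s = min_opr_alt s
  have hA : min_opr s = outerA s.toList (s.toList.length + 1) [] := rfl
  rw [hA]
  simp only [min_opr_alt]
  set l := s.toList with hl
  have hRrev : ((idxOf l ')').reverse).Pairwise (· > ·) := by
    rw [List.pairwise_reverse]; exact idxOf_pairwise l ')'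
  obtain ⟨hPerm, hSorted, -, -⟩ :=
    pick_main (idxOf l '(') ((idxOf l ')').reverse) (idxOf_pairwise l '(') hRrev
  set F := pickFlat (idxOf l '(') ((idxOf l ')').reverse) with hF
  set pl := (pickB ((idxOf l '(').zip ((idxOf l ')').reverse))).1 with hpl
  set pr := (pickB ((idxOf l '(').zip ((idxOf l ')').reverse))).2 with hpr
  have hNodupT : (pl ++ pr.reverse).Nodup := hSorted.imp (fun h => ne_of_lt h)
  have hFnodup : F.Nodup := hPerm.nodup_iff.2 hNodupT
  have hpass : passA l = F := by
    rw [passA_eq]; exact PySem.Set.ofList_eq_self_of_nodup F hFnodup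
  by_cases hFnil : F = []
  · have hplnil : pl = [] := by
      rw [hpl, ← pickFlat_nil_iff]; exact hFnil
    rw [outerA_succ]
    simp only [hpass, hFnil, hplnil]
    norm_num [PySem.Set.len]
  · have hplnil : ¬ pl = [] := by
      rw [hpl, ← pickFlat_nil_iff]; exact hFnil
    have hlenF : 0 < PySem.Set.len F := by
      have : F.length ≠ 0 := fun h => hFnil (List.length_eq_zero_iff.1 h)
      show (0 : Int) < (F.length : Int)
      omega
    have hlpos : l ≠ [] := by
      intro he
      apply hFnil
      rw [hF, he]
      rfl
    obtain ⟨m, hm⟩ : ∃ m, l.length = m + 1 :=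
      ⟨l.length - 1, by
        have : l.length ≠ 0 := fun h => hlpos (List.length_eq_zero_iff.1 h)
        omega⟩
    rw [outerA_succ]
    simp only [hpass]
    rw [if_pos hlenF, hm, outerA_succ]
    have hpass2 : passA (removeA l F) = ([] : PySem.Set Int) := by
      rw [show removeA l F = removeA l (passA l) by rw [hpass]]
      rw [passA_eq, pass_remove_nil]
      rfl
    simp only [hpass2]
    rw [if_neg (by norm_num [PySem.Set.len])]
    have hsorted : PySem.List.sorted (F : List Int) (fun i => i) = pl ++ pr.reverse :=
      PySem.List.sorted_eq_of_perm_of_pairwise_lt F (pl ++ pr.reverse) (fun i => i)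
        hPerm.symm (by simpa using hSorted)
    rw [if_neg hplnil, hsorted]
    have hlen : PySem.Set.len F = ((pl ++ pr.reverse).length : Int) := by
      show (F.length : Int) = _
      rw [hPerm.length_eq]
    rw [hlen]
    simp
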